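-- pv_equiv track=rewrite | github.com/Waldleufer/archproj-bmwteam | src/parent_handler.py | shared_sub_graphs_direct_list
-- ===== SOURCE A (Python) =====
-- def shared_sub_graphs_direct_list(node_compare_list1: list, node_compare_list2: list, head_list1: list, head_list2: list):
--     """
--     The function takes two lists of lists containing subgraphs that should be checked for overlap with each element of
--     the other list. also takes two "head_lists" which have to be the same length as their respective node_compare_list
--     and contain identifiers for the subgraphs at the same position as in node_compare_list.
--     The function is a helper to call shared_sub_graphs_direct with every element of the first list and the second list.
--
--     :param node_compare_list1: list of lists each containing the node_ids of an individual subgraph.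
--     :param node_compare_list2: list of lists each containing the node_ids of an individual subgraph.
--     :param head_list1: list of identifiers belonging to the head-node of each list in node_compare_list1.
--                         Has to have the same order and length as node_compare_list1.
--     :param head_list2: list of identifiers belonging to the head-node of each list in node_compare_list2.
--                         Has to have the same order and length as node_compare_list2.
--     :return: a list of identifier pairs (depending on the head_lists) whose subgraphs are directly overlapping.
--     """
--     result = []
--     for i in range(0, len(node_compare_list1)):
--         ncl1_dict = {}
--         for node in node_compare_list1[i]:
--             ncl1_dict[str(node)] = True
--
--         result_i = shared_sub_graphs_direct(ncl1_dict, node_compare_list2, head_list2)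
--         for name in result_i:
--             result.append((head_list1[i], name))
--     return result
--
-- def shared_sub_graphs_direct(main_nodes: dict, node_compare_list: list, head_list: list):
--     """
--     The function takes a dictionary of a subgraph and a list of lists containing other subgraphs.
--     It also takes a "head_list" which has to be the same length as node_compare_list and contains identifiers for
--     the subgraphs at the same position as in node_compare_list. The function checks whether any of the subgraphs in
--     the list shares a node with the subgraph-dictionary and returns a list of identifiers of the overlapping subgraphs.
--
--     :param main_nodes: a dictionary containing True at every node_id of an original graph.
--     :param node_compare_list: list of lists each containing the node_ids of an individual subgraph.
--     :param head_list: list of identifiers belonging to the head_node of each list in node_compare_list.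
--                         Has to have the same order and length as node_compare_list.
--     :return: a list of identifiers (depending on head_list) whose subgraphs are directly overlapping
--             with any of the main_nodes.
--     """
--     result_list = []
--     for i in range(0, len(node_compare_list)):
--         compare_nodes = node_compare_list[i]
--
--         is_overlapping = False
--         for n in compare_nodes:
--             if main_nodes.get(str(n)) is True:
--                 is_overlapping = True
--                 break
--
--         if is_overlapping is True:
--             result_list.append(head_list[i])
--
--     return result_list
-- ===== SOURCE B (Python) =====
-- def shared_sub_graphs_direct_list(node_compare_list1: list, node_compare_list2: list, head_list1: list, head_list2: list):
--     # Inverted index: node -> indices of list2 subgraphs containing it; per list1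
--     # subgraph, union the hit indices and emit them in increasing index order.
--     index = {}
--     for j, nodes in enumerate(node_compare_list2):
--         for n in nodes:
--             index.setdefault(n, []).append(j)
--     result = []
--     for i, nodes in enumerate(node_compare_list1):
--         hits = {j for n in nodes for j in index.get(n, ())}
--         for j in sorted(hits):
--             result.append((head_list1[i], head_list2[j]))
--     return result
-- ===== Notes on version B (the rewrite author's own statement) =====
-- stated objective: alternative
-- what changed: Replaced the per-list1-subgraph rebuild of a membership dict plus full rescan of every list2 subgraph with a single inverted index node->list2-indices built once; each list1 subgraph unions the hit indices of its own nodes and emits them sorted. Trades A's early-break rescan (cheap on dense overlap) for index lookups (cheap on sparse overlap); measured overall cost is comparable.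
import Mathlib
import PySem

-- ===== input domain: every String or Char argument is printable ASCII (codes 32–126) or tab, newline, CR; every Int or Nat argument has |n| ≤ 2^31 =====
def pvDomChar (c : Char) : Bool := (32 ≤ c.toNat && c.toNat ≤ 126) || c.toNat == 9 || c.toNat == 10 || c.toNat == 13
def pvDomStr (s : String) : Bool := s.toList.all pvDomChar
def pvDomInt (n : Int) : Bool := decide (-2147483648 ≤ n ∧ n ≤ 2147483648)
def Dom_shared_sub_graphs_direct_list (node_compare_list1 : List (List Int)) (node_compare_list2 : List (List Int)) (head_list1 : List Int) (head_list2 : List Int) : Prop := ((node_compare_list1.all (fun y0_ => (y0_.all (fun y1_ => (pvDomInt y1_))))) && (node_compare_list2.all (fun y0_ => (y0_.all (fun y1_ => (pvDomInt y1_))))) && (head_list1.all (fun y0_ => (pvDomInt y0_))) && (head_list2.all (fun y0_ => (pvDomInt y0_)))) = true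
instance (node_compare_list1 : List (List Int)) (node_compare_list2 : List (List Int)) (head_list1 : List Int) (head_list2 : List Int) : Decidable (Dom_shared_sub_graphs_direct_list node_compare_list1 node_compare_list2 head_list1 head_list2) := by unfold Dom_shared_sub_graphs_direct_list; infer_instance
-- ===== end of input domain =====

-- ===== PORT A =====
-- B replaces A's per-subgraph dict rebuild + full rescan of list2 with one inverted index built once; objective: alternative algorithm.
def shared_sub_graphs_direct (main_nodes : PySem.Dict String Bool) (node_compare_list : List (List Int)) (head_list : List Int) : List Int :=
  (PySem.List.pyRange 0 (node_compare_list.length : Int) 1).foldl (fun result_list i =>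
    let compare_nodes := PySem.List.pyGetD node_compare_list i []
    let is_overlapping := compare_nodes.any (fun n => main_nodes.get? (PySem.Int.toStr n) == some true)
    if is_overlapping then result_list ++ [PySem.List.pyGetD head_list i 0] else result_list) []

def shared_sub_graphs_direct_list (node_compare_list1 : List (List Int)) (node_compare_list2 : List (List Int)) (head_list1 : List Int) (head_list2 : List Int) : List (Int × Int) :=
  (PySem.List.pyRange 0 (node_compare_list1.length : Int) 1).foldl (fun result i =>
    let ncl1_dict := (PySem.List.pyGetD node_compare_list1 i []).foldl
      (fun d node => d.insert (PySem.Int.toStr node) true) PySem.Dict.empty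
    let result_i := shared_sub_graphs_direct ncl1_dict node_compare_list2 head_list2
    result ++ result_i.map (fun name => (PySem.List.pyGetD head_list1 i 0, name))) []

-- ===== PORT B =====
def shared_sub_graphs_direct_list_alt (node_compare_list1 : List (List Int)) (node_compare_list2 : List (List Int)) (head_list1 : List Int) (head_list2 : List Int) : List (Int × Int) :=
  let index : PySem.Dict Int (List Int) :=
    (PySem.List.enumerate node_compare_list2 0).foldl (fun d q =>
      q.2.foldl (fun d n => d.modify n [] (· ++ [q.1])) d) PySem.Dict.empty
  (PySem.List.enumerate node_compare_list1 0).foldl (fun result p =>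
    let hits : PySem.Set Int := PySem.Set.ofList (p.2.flatMap (fun n => index.getD n []))
    result ++ (PySem.List.sorted hits (fun x => x)).map
      (fun j => (PySem.List.pyGetD head_list1 p.1 0, PySem.List.pyGetD head_list2 j 0))) []

-- ===== PRECONDITION & SPEC =====
-- Pre_ is exactly where A returns normally: whenever a list1 subgraph overlaps a list2 subgraph,
-- both head lists must be long enough for the accessed positions (else Python raises IndexError).
def Pre_shared_sub_graphs_direct_list (node_compare_list1 : List (List Int)) (node_compare_list2 : List (List Int)) (head_list1 : List Int) (head_list2 : List Int) : Prop :=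
  ∀ i < node_compare_list1.length, ∀ j < node_compare_list2.length,
    (∃ n ∈ node_compare_list2.getD j [], n ∈ node_compare_list1.getD i []) →
      i < head_list1.length ∧ j < head_list2.length
instance (node_compare_list1 : List (List Int)) (node_compare_list2 : List (List Int)) (head_list1 : List Int) (head_list2 : List Int) : Decidable (Pre_shared_sub_graphs_direct_list node_compare_list1 node_compare_list2 head_list1 head_list2) := by unfold Pre_shared_sub_graphs_direct_list; infer_instance

def pvWitness_shared_sub_graphs_direct_list : List (List Int) × List (List Int) × List Int × List Int :=
  ([[1, 2]], [[2], [3]], [7], [8, 9])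

def Spec_shared_sub_graphs_direct_list (node_compare_list1 : List (List Int)) (node_compare_list2 : List (List Int)) (head_list1 : List Int) (head_list2 : List Int) (out : List (Int × Int)) : Prop := out = shared_sub_graphs_direct_list_alt node_compare_list1 node_compare_list2 head_list1 head_list2
instance (node_compare_list1 : List (List Int)) (node_compare_list2 : List (List Int)) (head_list1 : List Int) (head_list2 : List Int) (out : List (Int × Int)) : Decidable (Spec_shared_sub_graphs_direct_list node_compare_list1 node_compare_list2 head_list1 head_list2 out) := by unfold Spec_shared_sub_graphs_direct_list; infer_instance

-- ===== CLAIM (what is proved, stated in full; the proofs are below) =====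
def Claim_equal_shared_sub_graphs_direct_list : Prop := ∀ (node_compare_list1 : List (List Int)) (node_compare_list2 : List (List Int)) (head_list1 : List Int) (head_list2 : List Int), Dom_shared_sub_graphs_direct_list node_compare_list1 node_compare_list2 head_list1 head_list2 → Pre_shared_sub_graphs_direct_list node_compare_list1 node_compare_list2 head_list1 head_list2 → Spec_shared_sub_graphs_direct_list node_compare_list1 node_compare_list2 head_list1 head_list2 (shared_sub_graphs_direct_list node_compare_list1 node_compare_list2 head_list1 head_list2)

-- ===== LEMMAS AND PROOFS =====

-- the common reference value: per list1 node set `nodes`, the increasing list of overlapping list2 indices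
def pvJ (ncl2 : List (List Int)) (nodes : List Int) : List Int :=
  (PySem.List.pyRange 0 (ncl2.length : Int) 1).filter
    (fun j => (PySem.List.pyGetD ncl2 j []).any (fun n => nodes.contains n))

def pvPairs (ncl2 : List (List Int)) : List (Int × Int) :=
  (PySem.List.enumerate ncl2 0).flatMap (fun q => q.2.map (fun n => (n, q.1)))

def pvIndex (ncl2 : List (List Int)) : PySem.Dict Int (List Int) :=
  (PySem.List.enumerate ncl2 0).foldl (fun d q =>
    q.2.foldl (fun d n => d.modify n [] (· ++ [q.1])) d) PySem.Dict.empty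

lemma pv_digitChar_inj : ∀ m < 10, ∀ n < 10, Nat.digitChar m = Nat.digitChar n → m = n := by decide

lemma pv_toDigits10_inj (m : Nat) : ∀ n, Nat.toDigits 10 m = Nat.toDigits 10 n → m = n := by
  induction m using Nat.strong_induction_on with
  | _ m ih =>
    intro n h
    rw [Nat.toDigits_eq_if (by norm_num)] at h
    rw [Nat.toDigits_eq_if (b := 10) (n := n) (by norm_num)] at h
    split_ifs at h with h1 h2 h2
    · exact pv_digitChar_inj m h1 n h2 (List.singleton_inj.mp h)
    · have hlen := congrArg List.length h
      have hpos := Nat.length_toDigits_pos (b := 10) (n := n / 10)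
      simp only [List.length_append, List.length_cons] at hlen
      omega
    · have hlen := congrArg List.length h
      have hpos := Nat.length_toDigits_pos (b := 10) (n := m / 10)
      simp only [List.length_append, List.length_cons] at hlen
      omega
    · rw [← List.concat_eq_append, ← List.concat_eq_append, List.concat_inj] at h
      have hmod := pv_digitChar_inj (m % 10) (Nat.mod_lt _ (by norm_num)) (n % 10)
        (Nat.mod_lt _ (by norm_num)) h.2
      have hdiv := ih (m / 10) (Nat.div_lt_self (by omega) (by norm_num)) (n / 10) h.1
      omega

lemma pv_toStr_inj {m n : Int} (h : PySem.Int.toStr m = PySem.Int.toStr n) : m = n := by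
  have h' : PySem.Int.toChars m = PySem.Int.toChars n := by
    rw [← PySem.Int.toList_toStr, ← PySem.Int.toList_toStr, h]
  unfold PySem.Int.toChars at h'
  split_ifs at h' with h1 h2 h2
  · injection h' with _ h''
    have := pv_toDigits10_inj m.natAbs n.natAbs h''
    omega
  · exfalso
    have hm : '-' ∈ Nat.toDigits 10 n.toNat := by rw [← h']; exact List.mem_cons_self
    have := Nat.isDigit_of_mem_toDigits (by norm_num) (by norm_num) hm
    simp [Char.isDigit] at this
  · exfalso
    have hm : '-' ∈ Nat.toDigits 10 m.toNat := by rw [h']; exact List.mem_cons_self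
    have := Nat.isDigit_of_mem_toDigits (by norm_num) (by norm_num) hm
    simp [Char.isDigit] at this
  · have := pv_toDigits10_inj m.toNat n.toNat h'
    omega

-- A's membership dict: a key maps to `true` exactly when some listed node prints to it
lemma pv_dict_get? (nodes : List Int) (d : PySem.Dict String Bool) (s : String) :
    (nodes.foldl (fun d node => d.insert (PySem.Int.toStr node) true) d).get? s
      = if ∃ m ∈ nodes, PySem.Int.toStr m = s then some true else d.get? s := by
  induction nodes generalizing d with
  | nil => simp
  | cons x xs ih =>
    simp only [List.foldl_cons, ih, PySem.Dict.get?_insert]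
    by_cases hxs : ∃ m ∈ xs, PySem.Int.toStr m = s
    · obtain ⟨m, hm, hms⟩ := hxs
      have hc : ∃ m ∈ x :: xs, PySem.Int.toStr m = s := ⟨m, List.mem_cons_of_mem _ hm, hms⟩
      have hx' : ∃ m ∈ xs, PySem.Int.toStr m = s := ⟨m, hm, hms⟩
      simp [hx', hc]
    · by_cases hx : s = PySem.Int.toStr x
      · have hc : ∃ m ∈ x :: xs, PySem.Int.toStr m = s := ⟨x, List.mem_cons_self, hx.symm⟩
        simp [hc, hxs, hx]
      · have hc : ¬ ∃ m ∈ x :: xs, PySem.Int.toStr m = s := by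
          rintro ⟨m, hm, hms⟩
          rcases List.mem_cons.mp hm with rfl | hm'
          · exact hx hms.symm
          · exact hxs ⟨m, hm', hms⟩
        have hx2 : ¬ PySem.Int.toStr x = s := fun e => hx e.symm
        simp [hxs, hx, hx2]

lemma pv_dict_hit (nodes : List Int) (n : Int) :
    ((nodes.foldl (fun d node => d.insert (PySem.Int.toStr node) true) PySem.Dict.empty).get?
        (PySem.Int.toStr n) == some true) = nodes.contains n := by
  rw [pv_dict_get?]
  by_cases hn : n ∈ nodes
  · have hc : ∃ m ∈ nodes, PySem.Int.toStr m = PySem.Int.toStr n := ⟨n, hn, rfl⟩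
    simp [hc, hn]
  · have hc : ¬ ∃ m ∈ nodes, PySem.Int.toStr m = PySem.Int.toStr n := by
      rintro ⟨m, hm, hms⟩; exact hn (pv_toStr_inj hms ▸ hm)
    simp [hc, PySem.Dict.get?_empty, hn]

-- A's inner helper computes exactly pvJ mapped through head_list
lemma pv_sharedA (nodes : List Int) (ncl2 : List (List Int)) (hl2 : List Int) :
    shared_sub_graphs_direct
        (nodes.foldl (fun d node => d.insert (PySem.Int.toStr node) true) PySem.Dict.empty)
        ncl2 hl2
      = (pvJ ncl2 nodes).map (fun j => PySem.List.pyGetD hl2 j 0) := by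
  unfold shared_sub_graphs_direct pvJ
  rw [show (fun (result_list : List Int) (i : Int) =>
      let compare_nodes := PySem.List.pyGetD ncl2 i []
      let is_overlapping := compare_nodes.any (fun n =>
        (nodes.foldl (fun d node => d.insert (PySem.Int.toStr node) true) PySem.Dict.empty).get?
          (PySem.Int.toStr n) == some true)
      if is_overlapping then result_list ++ [PySem.List.pyGetD hl2 i 0] else result_list)
    = (fun result_list i =>
      if (PySem.List.pyGetD ncl2 i []).any (fun n => nodes.contains n)
      then result_list ++ [PySem.List.pyGetD hl2 i 0] else result_list) from by
      funext r i; simp only [pv_dict_hit]]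
  rw [PySem.List.foldl_append_if (fun i => (PySem.List.pyGetD ncl2 i []).any (fun n => nodes.contains n)) (fun i => PySem.List.pyGetD hl2 i 0)]
  simp

lemma pv_A_flat (n1 n2 : List (List Int)) (h1 h2 : List Int) :
    shared_sub_graphs_direct_list n1 n2 h1 h2
      = (PySem.List.pyRange 0 (n1.length : Int) 1).flatMap (fun i =>
          (pvJ n2 (PySem.List.pyGetD n1 i [])).map
            (fun j => (PySem.List.pyGetD h1 i 0, PySem.List.pyGetD h2 j 0))) := by
  unfold shared_sub_graphs_direct_list
  rw [show (fun (result : List (Int × Int)) (i : Int) =>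
      let ncl1_dict := (PySem.List.pyGetD n1 i []).foldl
        (fun d node => d.insert (PySem.Int.toStr node) true) PySem.Dict.empty
      let result_i := shared_sub_graphs_direct ncl1_dict n2 h2
      result ++ result_i.map (fun name => (PySem.List.pyGetD h1 i 0, name)))
    = (fun result i => result ++
        ((pvJ n2 (PySem.List.pyGetD n1 i [])).map
          (fun j => (PySem.List.pyGetD h1 i 0, PySem.List.pyGetD h2 j 0)))) from by
      funext r i
      show r ++ (shared_sub_graphs_direct _ n2 h2).map _ = _
      rw [pv_sharedA, List.map_map]
      rfl]
  rw [PySem.List.foldl_append_eq_flatMap]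
  simp

lemma pv_mem_pairs (ncl2 : List (List Int)) (n j : Int) :
    (n, j) ∈ pvPairs ncl2 ↔ ∃ (k : Nat) (_ : k < ncl2.length), j = (k : Int) ∧ n ∈ ncl2[k] := by
  unfold pvPairs
  simp only [List.mem_flatMap, PySem.List.mem_enumerate_iff, List.mem_map]
  constructor
  · rintro ⟨q, ⟨k, hk, rfl⟩, m, hm, hmq⟩
    refine ⟨k, hk, ?_, ?_⟩ <;> simp_all [Prod.ext_iff]
  · rintro ⟨k, hk, rfl, hn⟩
    exact ⟨((k : Int), ncl2[k]), ⟨k, hk, by simp⟩, n, hn, rfl⟩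

lemma pv_index_getD (ncl2 : List (List Int)) (n : Int) :
    (pvIndex ncl2).getD n [] = ((pvPairs ncl2).filter (fun p => p.1 == n)).map (·.2) := by
  have h : pvIndex ncl2 = (pvPairs ncl2).foldl
      (fun d p => d.modify p.1 [] (· ++ [p.2])) PySem.Dict.empty := by
    unfold pvIndex pvPairs
    rw [List.foldl_flatMap]
    simp only [List.foldl_map]
  rw [h, PySem.Dict.getD_foldl_modify_append]
  simp

lemma pv_mem_index (ncl2 : List (List Int)) (n j : Int) :
    j ∈ (pvIndex ncl2).getD n [] ↔ (n, j) ∈ pvPairs ncl2 := by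
  rw [pv_index_getD]
  simp only [List.mem_map, List.mem_filter, beq_iff_eq]
  constructor
  · rintro ⟨p, ⟨hp, rfl⟩, rfl⟩; exact hp
  · intro h; exact ⟨(n, j), ⟨h, rfl⟩, rfl⟩

lemma pv_mem_J (ncl2 : List (List Int)) (nodes : List Int) (j : Int) :
    j ∈ pvJ ncl2 nodes ↔ 0 ≤ j ∧ j < (ncl2.length : Int) ∧
      ∃ n ∈ PySem.List.pyGetD ncl2 j [], n ∈ nodes := by
  unfold pvJ
  simp only [List.mem_filter, PySem.List.mem_pyRange_one, List.any_eq_true, List.contains_iff_mem]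
  tauto

lemma pv_sortedB (ncl2 : List (List Int)) (nodes : List Int) :
    PySem.List.sorted (PySem.Set.ofList (nodes.flatMap (fun n => (pvIndex ncl2).getD n [])))
        (fun x => x)
      = pvJ ncl2 nodes := by
  have hpw : (pvJ ncl2 nodes).Pairwise (· < ·) :=
    (PySem.List.pairwise_lt_pyRange_one 0 (ncl2.length : Int)).filter _
  apply PySem.List.sorted_eq_of_perm_of_pairwise_lt
  · rw [List.perm_ext_iff_of_nodup (hpw.imp ne_of_lt) (PySem.Set.nodup_ofList _)]
    intro j
    rw [PySem.Set.mem_ofList, List.mem_flatMap, pv_mem_J]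
    constructor
    · rintro ⟨h0, hlt, n, hn, hmem⟩
      refine ⟨n, hmem, ?_⟩
      rw [pv_mem_index, pv_mem_pairs]
      refine ⟨j.toNat, by omega, by omega, ?_⟩
      rwa [PySem.List.pyGetD_eq_getElem ncl2 [] h0 (by simpa using hlt)] at hn
    · rintro ⟨n, hmem, hj⟩
      rw [pv_mem_index, pv_mem_pairs] at hj
      obtain ⟨k, hk, rfl, hn⟩ := hj
      refine ⟨by omega, by omega, n, ?_, hmem⟩
      rw [PySem.List.pyGetD_eq_getElem ncl2 [] (by omega) (by exact_mod_cast hk)]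
      simpa using hn
  · exact hpw

lemma pv_B_flat (n1 n2 : List (List Int)) (h1 h2 : List Int) :
    shared_sub_graphs_direct_list_alt n1 n2 h1 h2
      = (PySem.List.pyRange 0 (n1.length : Int) 1).flatMap (fun i =>
          (pvJ n2 (PySem.List.pyGetD n1 i [])).map
            (fun j => (PySem.List.pyGetD h1 i 0, PySem.List.pyGetD h2 j 0))) := by
  show (PySem.List.enumerate n1 0).foldl (fun result p =>
      result ++ (PySem.List.sorted
          (PySem.Set.ofList (p.2.flatMap (fun n => (pvIndex n2).getD n [])))
          (fun x => x)).map
        (fun j => (PySem.List.pyGetD h1 p.1 0, PySem.List.pyGetD h2 j 0))) [] = _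
  rw [show (fun (result : List (Int × Int)) (p : Int × List Int) =>
      result ++ (PySem.List.sorted
          (PySem.Set.ofList (p.2.flatMap (fun n => (pvIndex n2).getD n [])))
          (fun x => x)).map
        (fun j => (PySem.List.pyGetD h1 p.1 0, PySem.List.pyGetD h2 j 0)))
    = (fun result p => result ++ (pvJ n2 p.2).map
        (fun j => (PySem.List.pyGetD h1 p.1 0, PySem.List.pyGetD h2 j 0))) from by
      funext r p; rw [pv_sortedB]]
  rw [PySem.List.foldl_append_eq_flatMap]
  rw [PySem.List.enumerate_eq_map_pyRange n1 ([] : List Int), List.flatMap_map]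
  simp

-- ===== VERDICT (by name: the statement is the Claim_ definition above) =====
theorem shared_sub_graphs_direct_list_spec : Claim_equal_shared_sub_graphs_direct_list := by
  intro n1 n2 h1 h2 _ _
  unfold Spec_shared_sub_graphs_direct_list
  rw [pv_A_flat, pv_B_flat]
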